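-- pv_equiv track=rewrite | github.com/csgarcia/curso-py | advanced-types/15.exercise.py | get_max_value_tuples
-- ===== SOURCE A (Python) =====
-- def get_max_value_tuples(tuples_list):
--     if not tuples_list:
--         return []
--     # get the max value of the list of tuples
--     tuple_with_max_value = max(tuples_list, key=lambda item: item[1])
--     max_value = tuple_with_max_value[1]
--     # filter the list of tuples to get only the tuples with the max value
--     # not an elegant way
--     # max_value_tuples = []
--     # for item in tuples_list:
--     #     if (item[1] == max_value):
--     #         max_value_tuples.append(item)
--     # return max_value_tuples
--     max_value_tuples = [
--         max_value_tuple for max_value_tuple in tuples_list if max_value_tuple[1] == max_value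
--     ]
--     return max_value_tuples
-- ===== SOURCE B (Python) =====
-- def get_max_value_tuples(tuples_list):
--     # single pass: maintain running max of second components and the tuples achieving it
--     max_value = None
--     result = []
--     for item in tuples_list:
--         if max_value is None or item[1] > max_value:
--             max_value = item[1]
--             result = [item]
--         elif item[1] == max_value:
--             result.append(item)
--     return result
-- ===== Notes on version B (the rewrite author's own statement) =====
-- stated objective: alternative
-- what changed: Replaces A's two scans (max with key, then a filter comprehension) by one fold that keeps the running maximum second component and the list of tuples achieving it, resetting on a new maximum.
import Mathlib
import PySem

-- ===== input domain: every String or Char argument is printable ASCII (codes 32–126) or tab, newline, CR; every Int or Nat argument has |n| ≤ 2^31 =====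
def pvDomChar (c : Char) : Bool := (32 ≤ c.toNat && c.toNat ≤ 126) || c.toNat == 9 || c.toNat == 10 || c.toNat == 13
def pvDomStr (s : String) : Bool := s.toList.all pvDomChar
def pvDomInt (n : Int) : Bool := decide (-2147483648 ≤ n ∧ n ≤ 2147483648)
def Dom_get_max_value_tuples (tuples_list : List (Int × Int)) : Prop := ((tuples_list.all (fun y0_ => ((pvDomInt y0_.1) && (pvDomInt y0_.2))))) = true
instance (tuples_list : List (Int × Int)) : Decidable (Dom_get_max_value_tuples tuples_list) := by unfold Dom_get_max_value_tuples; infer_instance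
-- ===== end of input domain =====

-- ===== PORT A =====
-- B changes: one fused pass (running max + collected ties) instead of A's max()-then-filter two scans; alternative decomposition, same cost.
def get_max_value_tuples (tuples_list : List (Int × Int)) : List (Int × Int) :=
  if tuples_list = [] then []
  else
    match PySem.List.max? tuples_list (fun item => item.2) with
    | none => []   -- unreachable: tuples_list ≠ []
    | some tuple_with_max_value =>
      let max_value := tuple_with_max_value.2
      tuples_list.filter (fun max_value_tuple => max_value_tuple.2 == max_value)

-- ===== PORT B =====
def gmvtStep (st : Option Int × List (Int × Int)) (item : Int × Int) : Option Int × List (Int × Int) :=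
  match st with
  | (none, _) => (some item.2, [item])
  | (some m, res) =>
    if item.2 > m then (some item.2, [item])
    else if item.2 == m then (some m, res ++ [item])
    else (some m, res)

def get_max_value_tuples_alt (tuples_list : List (Int × Int)) : List (Int × Int) :=
  (tuples_list.foldl gmvtStep (none, [])).2

-- ===== PRECONDITION & SPEC =====
def Spec_get_max_value_tuples (tuples_list : List (Int × Int)) (out : List (Int × Int)) : Prop := out = get_max_value_tuples_alt tuples_list
instance (tuples_list : List (Int × Int)) (out : List (Int × Int)) : Decidable (Spec_get_max_value_tuples tuples_list out) := by unfold Spec_get_max_value_tuples; infer_instance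

-- ===== CLAIM (what is proved, stated in full; the proofs are below) =====
def Claim_equal_get_max_value_tuples : Prop := ∀ (tuples_list : List (Int × Int)), Dom_get_max_value_tuples tuples_list → Spec_get_max_value_tuples tuples_list (get_max_value_tuples tuples_list)

-- ===== LEMMAS AND PROOFS =====

-- the running max of second components is the init or achieved by some element
lemma gmvt_max_mem (t : List (Int × Int)) (a : Int) :
    t.foldl (fun acc y => max acc y.2) a = a ∨ ∃ y ∈ t, t.foldl (fun acc y => max acc y.2) a = y.2 := by
  induction t generalizing a with
  | nil => exact Or.inl rfl
  | cons x s ih =>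
    simp only [List.foldl_cons]
    rcases ih (max a x.2) with h | ⟨y, hy, hEq⟩
    · rcases max_choice a x.2 with hm | hm
      · exact Or.inl (by rw [h, hm])
      · exact Or.inr ⟨x, by simp, by rw [h, hm]⟩
    · exact Or.inr ⟨y, by simp [hy], hEq⟩

-- fold invariant for B starting from an established running max m with collected ties res
lemma gmvt_fold_inv (t : List (Int × Int)) (m : Int) (res : List (Int × Int)) :
    t.foldl gmvtStep (some m, res) =
      (some (t.foldl (fun acc y => max acc y.2) m),
       (if t.foldl (fun acc y => max acc y.2) m > m then ([] : List (Int × Int)) else res)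
         ++ t.filter (fun y => y.2 == t.foldl (fun acc y => max acc y.2) m)) := by
  induction t generalizing m res with
  | nil => simp
  | cons x s ih =>
    have hle : m ≤ s.foldl (fun acc y => max acc y.2) (max m x.2) := by
      have := (PySem.List.le_foldl_max_int s (fun y => y.2) (max m x.2)).1
      exact le_trans (le_max_left _ _) this
    simp only [List.foldl_cons]
    by_cases hgt : x.2 > m
    · have hmax : max m x.2 = x.2 := max_eq_right (le_of_lt hgt)
      have hxle : x.2 ≤ s.foldl (fun acc y => max acc y.2) (max m x.2) := by
        have := (PySem.List.le_foldl_max_int s (fun y => y.2) (max m x.2)).1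
        exact le_trans (le_max_right _ _) this
      rw [show gmvtStep (some m, res) x = (some x.2, [x]) by simp [gmvtStep, hgt]]
      rw [ih x.2 [x]]
      simp only [hmax]
      have hM : s.foldl (fun acc y => max acc y.2) x.2 > m :=
        lt_of_lt_of_le hgt (by rw [hmax] at hxle; exact hxle)
      simp only [hM, if_pos]
      by_cases h2 : s.foldl (fun acc y => max acc y.2) x.2 > x.2
      · simp [h2, show ¬ (x.2 == s.foldl (fun acc y => max acc y.2) x.2) = true by simp; omega]
      · have hx2 : x.2 = s.foldl (fun acc y => max acc y.2) x.2 := by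
          rw [hmax] at hxle; omega
        simp [← hx2]
    · by_cases heq : x.2 = m
      · rw [show gmvtStep (some m, res) x = (some m, res ++ [x]) by simp [gmvtStep, heq]]
        rw [ih m (res ++ [x])]
        have hmax : max m x.2 = m := max_eq_left (le_of_not_gt hgt)
        simp only [hmax]
        by_cases h2 : s.foldl (fun acc y => max acc y.2) m > m
        · simp [h2, show ¬ (x.2 == s.foldl (fun acc y => max acc y.2) m) = true by simp; omega]
        · have hm2 : s.foldl (fun acc y => max acc y.2) m = m := by
            have := (PySem.List.le_foldl_max_int s (fun y => y.2) m).1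
            omega
          simp [heq, hm2]
      · rw [show gmvtStep (some m, res) x = (some m, res) by simp [gmvtStep, hgt, heq]]
        rw [ih m res]
        have hmax : max m x.2 = m := max_eq_left (le_of_not_gt hgt)
        simp only [hmax]
        have hxlt : x.2 < m := lt_of_le_of_ne (le_of_not_gt hgt) heq
        have hmle : m ≤ s.foldl (fun acc y => max acc y.2) m :=
          (PySem.List.le_foldl_max_int s (fun y => y.2) m).1
        simp [show ¬ (x.2 == s.foldl (fun acc y => max acc y.2) m) = true by simp; omega]

-- ===== VERDICT (by name: the statement is the Claim_ definition above) =====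
theorem get_max_value_tuples_spec : Claim_equal_get_max_value_tuples := by
  intro tuples_list _
  unfold Spec_get_max_value_tuples get_max_value_tuples get_max_value_tuples_alt
  cases tuples_list with
  | nil => simp
  | cons x t =>
    simp only [if_neg (List.cons_ne_nil x t)]
    obtain ⟨w, hw⟩ : ∃ w, PySem.List.max? (x :: t) (fun item => item.2) = some w := by
      cases h : PySem.List.max? (x :: t) (fun item => item.2) with
      | none => rw [PySem.List.max?_eq_none_iff] at h; exact absurd h (List.cons_ne_nil x t)
      | some w => exact ⟨w, rfl⟩
    rw [hw]
    set M := t.foldl (fun acc y => max acc y.2) x.2 with hMdef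
    have hub : ∀ y ∈ x :: t, y.2 ≤ M := by
      intro y hy
      rcases List.mem_cons.mp hy with h | h
      · subst h; exact (PySem.List.le_foldl_max_int t (fun y => y.2) y.2).1
      · exact (PySem.List.le_foldl_max_int t (fun y => y.2) x.2).2 y h
    have hwM : w.2 = M := by
      have h1 : w.2 ≤ M := hub w (PySem.List.max?_mem hw)
      have h2 : M ≤ w.2 := by
        have hmax := PySem.List.max?_isMax hw
        rcases gmvt_max_mem t x.2 with h | ⟨y, hy, hEq⟩
        · rw [← hMdef] at h; rw [h]; exact hmax x (by simp)
        · rw [← hMdef] at hEq; rw [hEq]; exact hmax y (by simp [hy])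
      omega
    have hfold : (x :: t).foldl gmvtStep (none, []) =
        (some M, (if M > x.2 then ([] : List (Int × Int)) else [x]) ++ t.filter (fun y => y.2 == M)) := by
      simp only [List.foldl_cons]
      rw [show gmvtStep (none, []) x = (some x.2, [x]) from rfl]
      exact gmvt_fold_inv t x.2 [x]
    rw [hfold]
    simp only [hwM]
    have hxle : x.2 ≤ M := hub x (by simp)
    by_cases h : M > x.2
    · simp [h, show ¬ (x.2 == M) = true by simp; omega]
    · have : x.2 = M := by omega
      simp [this]
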